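-- pv_equiv track=rewrite | github.com/jgroom33/saos6-saos10-converter | jinja_filters.py | merge_table_by_key
-- ===== SOURCE A (Python) =====
-- def merge_table_by_key(table, table_key):
--     """
--     Merge the contents of a table based on the key of that table.  This assumes that properties in the rows being merged do not overlap. Example:
--
--     Original
--
--     | key | foo | bar | baz |
--     | --- | --- | --- | --- |
--     | 1   | a   |     |     |
--     | 1   |     | b   | c   |
--     | 2   | a   |     |     |
--
--     Merged
--
--     | key | foo | bar | baz |
--     | --- | --- | --- | --- |
--     | 1   | a   | b   | c   |
--     | 2   | a   |     |     |
--     """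
--     result = {}
--     for row in table:
--         if row[table_key] in result:
--             for (key, value) in row.items():
--                 if value != "":
--                     result[row[table_key]][key] = value
--         else:
--             result[row[table_key]] = row
--     return list(result.values())
-- ===== SOURCE B (Python) =====
-- def merge_table_by_key(table, table_key):
--     # Pass 1: bucket the rows by their key value, first-occurrence order.
--     groups = {}
--     for row in table:
--         groups.setdefault(row[table_key], []).append(row)
--     # Pass 2: collapse each bucket into its first row (mutated in place, as A does).
--     merged = []
--     for rows in groups.values():
--         base = rows[0]
--         for extra in rows[1:]:
--             for key, value in extra.items():
--                 if value != "":
--                     base[key] = value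
--         merged.append(base)
--     return merged
-- ===== Notes on version B (the rewrite author's own statement) =====
-- stated objective: alternative
-- what changed: A merges on the fly inside a single pass keyed by a result dict; B first builds a grouping index (setdefault/append) in one pass and then collapses each bucket into its first row in a separate second pass.
import Mathlib
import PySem

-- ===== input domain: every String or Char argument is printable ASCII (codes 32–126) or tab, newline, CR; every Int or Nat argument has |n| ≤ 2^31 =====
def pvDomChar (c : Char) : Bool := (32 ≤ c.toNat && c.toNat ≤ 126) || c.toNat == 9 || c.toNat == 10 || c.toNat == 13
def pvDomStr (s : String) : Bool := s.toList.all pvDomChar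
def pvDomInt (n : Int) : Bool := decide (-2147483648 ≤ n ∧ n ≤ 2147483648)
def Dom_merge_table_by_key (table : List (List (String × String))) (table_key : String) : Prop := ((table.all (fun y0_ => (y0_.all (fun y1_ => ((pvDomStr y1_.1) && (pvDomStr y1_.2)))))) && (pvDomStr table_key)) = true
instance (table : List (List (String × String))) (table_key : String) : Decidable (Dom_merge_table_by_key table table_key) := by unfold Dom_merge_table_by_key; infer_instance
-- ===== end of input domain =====

-- B replaces A's merge-as-you-go single pass by a bucket-by-key pass followed by a
-- separate collapse pass (alternative decomposition, same cost). Both A and B mutate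
-- the first row of each group in place; the equivalence proved here is about the
-- RETURN value only.


-- ===== PORT A =====
-- rows are Python dicts: the List (String × String) argument is read through
-- PySem.Dict.ofList (duplicate keys overwrite in place, as a Python dict does).
def merge_table_by_key (table : List (List (String × String))) (table_key : String) : List (List (String × String)) :=
  let result : PySem.Dict String (PySem.Dict String String) :=
    table.foldl (fun result row =>
      let rowD := PySem.Dict.ofList row
      let k := rowD.getD table_key ""   -- row[table_key]; KeyError (key absent) excluded by Pre_
      if result.contains k then
        -- for (key, value) in row.items(): if value != "": result[k][key] = value
        result.modify k PySem.Dict.empty (fun base =>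
          rowD.items.foldl (fun base kv =>
            if kv.2 ≠ "" then base.insert kv.1 kv.2 else base) base)
      else
        result.insert k rowD) PySem.Dict.empty
  result.values.map PySem.Dict.items

-- ===== PORT B =====
-- merge one extra row's non-empty cells into base (Source B's innermost loop)
def mtbk_absorb (base extra : PySem.Dict String String) : PySem.Dict String String :=
  extra.items.foldl (fun b kv => if kv.2 ≠ "" then b.insert kv.1 kv.2 else b) base

-- collapse one bucket: base = rows[0] (buckets are never empty; headD's default is unreachable),
-- then absorb rows[1:]
def mtbk_squash (rows : List (PySem.Dict String String)) : PySem.Dict String String :=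
  (rows.drop 1).foldl mtbk_absorb (rows.headD PySem.Dict.empty)

def merge_table_by_key_alt (table : List (List (String × String))) (table_key : String) : List (List (String × String)) :=
  let groups : PySem.Dict String (List (PySem.Dict String String)) :=
    table.foldl (fun groups row =>
      let rowD := PySem.Dict.ofList row
      groups.modify (rowD.getD table_key "") [] (fun rs => rs ++ [rowD])) PySem.Dict.empty
  groups.values.foldl (fun merged rows => merged ++ [(mtbk_squash rows).items]) []

-- ===== PRECONDITION & SPEC =====
-- Pre_ excludes exactly the inputs where A raises KeyError: a row without the key table_key.
def Pre_merge_table_by_key (table : List (List (String × String))) (table_key : String) : Prop :=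
  (table.all (fun row => row.any (fun p => p.1 == table_key))) = true
instance (table : List (List (String × String))) (table_key : String) : Decidable (Pre_merge_table_by_key table table_key) := by unfold Pre_merge_table_by_key; infer_instance
def pvWitness_merge_table_by_key : (List (List (String × String))) × String :=
  ([[("k", "1"), ("foo", "a")], [("k", "1"), ("bar", "b")], [("k", "2"), ("foo", "a")]], "k")

def Spec_merge_table_by_key (table : List (List (String × String))) (table_key : String) (out : List (List (String × String))) : Prop := out = merge_table_by_key_alt table table_key
instance (table : List (List (String × String))) (table_key : String) (out : List (List (String × String))) : Decidable (Spec_merge_table_by_key table table_key out) := by unfold Spec_merge_table_by_key; infer_instance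

-- ===== CLAIM (what is proved, stated in full; the proofs are below) =====
def Claim_equal_merge_table_by_key : Prop := ∀ (table : List (List (String × String))) (table_key : String), Dom_merge_table_by_key table table_key → Pre_merge_table_by_key table table_key → Spec_merge_table_by_key table table_key (merge_table_by_key table table_key)

-- ===== LEMMAS AND PROOFS =====

-- A's running dict, reconstructed from B's grouping dict: same keys, each bucket squashed.
def mtbkRmap (g : PySem.Dict String (List (PySem.Dict String String))) :
    PySem.Dict String (PySem.Dict String String) :=
  ⟨g.items.map (fun p => (p.1, mtbk_squash p.2))⟩

lemma mtbkRmap_contains (g : PySem.Dict String (List (PySem.Dict String String))) (k : String) :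
    (mtbkRmap g).contains k = g.contains k := by
  simp [mtbkRmap, PySem.Dict.contains, List.any_map, Function.comp_def]

lemma mtbkRmap_get? (g : PySem.Dict String (List (PySem.Dict String String))) (k : String) :
    (mtbkRmap g).get? k = (g.get? k).map mtbk_squash := by
  simp [mtbkRmap, PySem.Dict.get?, List.find?_map, Function.comp_def]

lemma mtbkRmap_insert (g : PySem.Dict String (List (PySem.Dict String String))) (k : String)
    (v : List (PySem.Dict String String)) :
    mtbkRmap (g.insert k v) = (mtbkRmap g).insert k (mtbk_squash v) := by
  unfold PySem.Dict.insert
  rw [mtbkRmap_contains]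
  by_cases hc : g.contains k = true
  · simp only [hc, if_pos]
    apply PySem.Dict.ext
    simp only [mtbkRmap, List.map_map]
    apply List.map_congr_left
    intro p _
    simp only [Function.comp_def]
    by_cases h : p.1 = k <;> simp [h]
  · simp only [hc, if_neg, Bool.not_eq_true] at *
    simp [mtbkRmap]

lemma mtbk_squash_append (rows : List (PySem.Dict String String)) (r : PySem.Dict String String)
    (h : rows ≠ []) : mtbk_squash (rows ++ [r]) = mtbk_absorb (mtbk_squash rows) r := by
  cases rows with
  | nil => exact absurd rfl h
  | cons b rest => simp [mtbk_squash, List.foldl_append]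

lemma mtbk_loop (table_key : String) (table : List (List (String × String)))
    (g : PySem.Dict String (List (PySem.Dict String String)))
    (hne : ∀ p ∈ g.items, p.2 ≠ []) :
    table.foldl (fun result row =>
      let rowD := PySem.Dict.ofList row
      let k := rowD.getD table_key ""
      if result.contains k then
        result.modify k PySem.Dict.empty (fun base =>
          rowD.items.foldl (fun base kv =>
            if kv.2 ≠ "" then base.insert kv.1 kv.2 else base) base)
      else
        result.insert k rowD) (mtbkRmap g)
    = mtbkRmap (table.foldl (fun groups row =>
        let rowD := PySem.Dict.ofList row
        groups.modify (rowD.getD table_key "") [] (fun rs => rs ++ [rowD])) g) := by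
  induction table generalizing g with
  | nil => rfl
  | cons row t ih =>
    simp only [List.foldl_cons]
    set rowD := PySem.Dict.ofList row with hrowD
    set k := rowD.getD table_key "" with hk
    have hstep :
        (if (mtbkRmap g).contains k then
          (mtbkRmap g).modify k PySem.Dict.empty (fun base =>
            rowD.items.foldl (fun base kv =>
              if kv.2 ≠ "" then base.insert kv.1 kv.2 else base) base)
        else (mtbkRmap g).insert k rowD)
        = mtbkRmap (g.modify k [] (fun rs => rs ++ [rowD])) := by
      rw [mtbkRmap_contains]
      unfold PySem.Dict.modify
      rw [mtbkRmap_insert]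
      by_cases hc : g.contains k = true
      · simp only [hc, if_pos]
        obtain ⟨rows, hrows⟩ : ∃ rows, g.get? k = some rows := by
          have := PySem.Dict.contains_eq_isSome_get? g k
          rw [hc] at this
          exact Option.isSome_iff_exists.mp this.symm
        have hmem := PySem.Dict.mem_items_of_get?_eq_some g hrows
        have hnz : rows ≠ [] := hne _ hmem
        have hgd : g.getD k [] = rows := by simp [PySem.Dict.getD, hrows]
        have hgd2 : (mtbkRmap g).getD k PySem.Dict.empty = mtbk_squash rows := by
          simp [PySem.Dict.getD, mtbkRmap_get?, hrows]
        rw [hgd, hgd2, mtbk_squash_append rows rowD hnz]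
        rfl
      · have hc' : g.contains k = false := eq_false_of_ne_true hc
        simp only [hc', Bool.false_eq_true, if_false]
        have hgd : g.getD k [] = [] := PySem.Dict.getD_of_not_contains g [] hc'
        rw [hgd]
        have : mtbk_squash ([] ++ [rowD]) = rowD := by simp [mtbk_squash]
        rw [this]
    rw [hstep]
    apply ih
    intro p hp
    unfold PySem.Dict.modify at hp
    rcases (PySem.Dict.mem_items_insert _ _ _ _).mp hp with h1 | h2
    · subst h1; simp
    · exact hne _ h2.1

-- ===== VERDICT (by name: the statement is the Claim_ definition above) =====
theorem merge_table_by_key_spec : Claim_equal_merge_table_by_key := by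
  intro table table_key _ _
  unfold Spec_merge_table_by_key merge_table_by_key merge_table_by_key_alt
  have h0 : (PySem.Dict.empty : PySem.Dict String (PySem.Dict String String)) = mtbkRmap PySem.Dict.empty := rfl
  rw [h0, mtbk_loop table_key table PySem.Dict.empty (by intro p hp; simp [PySem.Dict.empty] at hp)]
  rw [PySem.List.foldl_append_singleton_eq_map]
  simp [mtbkRmap, PySem.Dict.values, List.map_map, Function.comp_def]
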